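-- pv_equiv track=rewrite | github.com/ironyoid/clip-bench | archive/dino-bench.py | build_qrels
-- ===== SOURCE A (Python) =====
-- def build_qrels(caption_ids, image_ids):
--     obj_to_images = {}
--     for idx, obj_id in enumerate(image_ids):
--         obj_to_images.setdefault(obj_id, []).append(idx)
--
--     qrels = {}
--     for i, obj_id in enumerate(caption_ids):
--         qid = f"q{i}"
--         rels = {f"img{idx}": 1 for idx in obj_to_images.get(obj_id, [])}
--         qrels[qid] = rels
--     return qrels
-- ===== SOURCE B (Python) =====
-- def build_qrels(caption_ids, image_ids):
--     # One nested comprehension: for each caption, scan the image list directly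
--     # instead of building an obj_id -> indices index first.
--     return {
--         f"q{i}": {f"img{idx}": 1 for idx, oid in enumerate(image_ids) if oid == obj_id}
--         for i, obj_id in enumerate(caption_ids)
--     }
-- ===== Notes on version B (the rewrite author's own statement) =====
-- stated objective: simpler
-- what changed: Replaces A's two-phase 'build an obj_id->indices dict, then look it up per caption' with a single nested comprehension that scans the image list directly for each caption.
import Mathlib
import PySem

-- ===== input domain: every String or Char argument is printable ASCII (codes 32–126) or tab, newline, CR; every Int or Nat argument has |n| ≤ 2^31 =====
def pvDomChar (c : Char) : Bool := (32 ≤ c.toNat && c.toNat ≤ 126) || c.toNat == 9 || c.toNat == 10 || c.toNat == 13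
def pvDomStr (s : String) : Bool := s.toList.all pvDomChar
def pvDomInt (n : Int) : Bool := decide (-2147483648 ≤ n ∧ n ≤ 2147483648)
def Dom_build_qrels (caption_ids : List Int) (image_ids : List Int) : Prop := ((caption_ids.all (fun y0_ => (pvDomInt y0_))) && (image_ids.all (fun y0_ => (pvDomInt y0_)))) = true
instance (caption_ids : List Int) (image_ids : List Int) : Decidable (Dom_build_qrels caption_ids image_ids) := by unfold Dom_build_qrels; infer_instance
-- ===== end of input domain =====

-- B replaces A's two-phase "build an obj_id -> indices index, then look it up per caption"
-- with a single nested comprehension scanning the image list per caption (simpler, not faster).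

-- ===== PORT A =====
def build_qrels (caption_ids : List Int) (image_ids : List Int) : List (String × List (String × Int)) :=
  -- obj_to_images = {}; for idx, obj_id in enumerate(image_ids): obj_to_images.setdefault(obj_id, []).append(idx)
  -- (setdefault-then-append on the shared list == modify with default [])
  let obj_to_images : PySem.Dict Int (List Int) :=
    (PySem.List.enumerate image_ids 0).foldl
      (fun d p => d.modify p.2 [] (fun l => l ++ [p.1])) PySem.Dict.empty
  -- qrels = {}; for i, obj_id in enumerate(caption_ids): rels = {f"img{idx}": 1 for idx in ...}; qrels[qid] = rels
  let qrels : PySem.Dict String (List (String × Int)) :=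
    (PySem.List.enumerate caption_ids 0).foldl
      (fun q p =>
        let rels : PySem.Dict String Int :=
          (obj_to_images.getD p.2 []).foldl
            (fun r idx => r.insert ("img" ++ PySem.Int.toStr idx) 1) PySem.Dict.empty
        q.insert ("q" ++ PySem.Int.toStr p.1) rels.items) PySem.Dict.empty
  qrels.items

-- ===== PORT B =====
-- dict comprehensions whose keys are distinct by construction (fresh f"q{i}" / f"img{idx}")
-- are the association lists built in iteration order
def build_qrels_alt (caption_ids : List Int) (image_ids : List Int) : List (String × List (String × Int)) :=
  (PySem.List.enumerate caption_ids 0).map (fun p =>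
    ("q" ++ PySem.Int.toStr p.1,
     ((PySem.List.enumerate image_ids 0).filter (fun e => e.2 == p.2)).map
       (fun e => ("img" ++ PySem.Int.toStr e.1, (1 : Int)))))

-- ===== PRECONDITION & SPEC =====
def Spec_build_qrels (caption_ids : List Int) (image_ids : List Int) (out : List (String × List (String × Int))) : Prop := out = build_qrels_alt caption_ids image_ids
instance (caption_ids : List Int) (image_ids : List Int) (out : List (String × List (String × Int))) : Decidable (Spec_build_qrels caption_ids image_ids out) := by unfold Spec_build_qrels; infer_instance

-- ===== CLAIM (what is proved, stated in full; the proofs are below) =====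
def Claim_equal_build_qrels : Prop := ∀ (caption_ids : List Int) (image_ids : List Int), Dom_build_qrels caption_ids image_ids → Spec_build_qrels caption_ids image_ids (build_qrels caption_ids image_ids)

-- ===== LEMMAS AND PROOFS =====

-- decimal digits of n, most significant first (= Nat.toDigits 10 n, fuel-free)
def pvAux (n : Nat) : List Char :=
  if h : n / 10 = 0 then [Nat.digitChar (n % 10)]
  else pvAux (n / 10) ++ [Nat.digitChar (n % 10)]
decreasing_by
  have h0 : n ≠ 0 := by intro hn; subst hn; simp at h
  exact Nat.div_lt_self (Nat.pos_of_ne_zero h0) (by norm_num)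

theorem pvToDigitsCore_eq : ∀ (fuel n : Nat) (acc : List Char), n < fuel →
    Nat.toDigitsCore 10 fuel n acc = pvAux n ++ acc := by
  intro fuel
  induction fuel with
  | zero => intro n acc h; omega
  | succ f ih =>
    intro n acc h
    rw [Nat.toDigitsCore]
    by_cases h10 : n / 10 = 0
    · rw [if_pos h10]
      conv_rhs => rw [pvAux]
      rw [dif_pos h10]; rfl
    · rw [if_neg h10, ih (n / 10) _ (by omega)]
      conv_rhs => rw [pvAux]
      rw [dif_neg h10]
      simp [List.append_assoc]

theorem pvToDigits_eq (n : Nat) : Nat.toDigits 10 n = pvAux n := by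
  have := pvToDigitsCore_eq (n + 1) n [] (by omega)
  simpa [Nat.toDigits] using this

def pvVal (c : Char) : Nat := c.toNat - 48
def pvDec (s : Nat) (cs : List Char) : Nat := cs.foldl (fun a c => a * 10 + pvVal c) s

theorem pvVal_digitChar (d : Nat) (h : d < 10) : pvVal (Nat.digitChar d) = d := by
  interval_cases d <;> decide

theorem pvDec_append (s : Nat) (l1 l2 : List Char) :
    pvDec s (l1 ++ l2) = pvDec (pvDec s l1) l2 := by
  simp [pvDec, List.foldl_append]

theorem pvDec_pvAux (n : Nat) : ∀ s : Nat, pvDec s (pvAux n) = s * 10 ^ (pvAux n).length + n := by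
  induction n using Nat.strong_induction_on with
  | _ n ih =>
    intro s
    rw [pvAux]
    by_cases h10 : n / 10 = 0
    · rw [dif_pos h10]
      simp only [pvDec, List.foldl_cons, List.foldl_nil, List.length_singleton, pow_one]
      rw [pvVal_digitChar (n % 10) (by omega)]
      omega
    · rw [dif_neg h10]
      have h0 : n ≠ 0 := by intro hn; subst hn; simp at h10
      have hrec := ih (n / 10) (Nat.div_lt_self (Nat.pos_of_ne_zero h0) (by norm_num)) s
      rw [pvDec_append, hrec]
      simp [pvDec, pvVal_digitChar (n % 10) (by omega), List.length_append, pow_succ]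
      ring_nf
      omega

theorem pvAux_inj (a b : Nat) (h : pvAux a = pvAux b) : a = b := by
  have ha := pvDec_pvAux a 0
  have hb := pvDec_pvAux b 0
  rw [h] at ha
  omega

theorem pvToStr_inj_nonneg (a b : Int) (ha : 0 ≤ a) (hb : 0 ≤ b)
    (h : PySem.Int.toStr a = PySem.Int.toStr b) : a = b := by
  have hc : PySem.Int.toChars a = PySem.Int.toChars b := by
    rw [← PySem.Int.toList_toStr, ← PySem.Int.toList_toStr, h]
  unfold PySem.Int.toChars at hc
  rw [if_neg (by omega), if_neg (by omega), pvToDigits_eq, pvToDigits_eq] at hc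
  have := pvAux_inj a.toNat b.toNat hc
  omega

theorem pvKey_inj (pre : String) (a b : Int) (ha : 0 ≤ a) (hb : 0 ≤ b)
    (h : pre ++ PySem.Int.toStr a = pre ++ PySem.Int.toStr b) : a = b := by
  apply pvToStr_inj_nonneg a b ha hb
  have : (pre ++ PySem.Int.toStr a).toList = (pre ++ PySem.Int.toStr b).toList := by rw [h]
  simp only [String.toList_append] at this
  have := List.append_cancel_left this
  exact String.toList_injective this

theorem pv_items_empty_int : (PySem.Dict.empty : PySem.Dict String Int).items = [] := rfl

theorem pv_items_empty_q : (PySem.Dict.empty : PySem.Dict String (List (String × Int))).items = [] := rfl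

-- grouping loop: the value at c is the old value plus all p.1 with p.2 = c, in order
theorem pvGroup (l : List (Int × Int)) (d : PySem.Dict Int (List Int)) (c : Int) :
    (l.foldl (fun d p => d.modify p.2 [] (fun v => v ++ [p.1])) d).getD c []
      = d.getD c [] ++ (l.filter (fun p => p.2 == c)).map (·.1) := by
  induction l generalizing d with
  | nil => simp
  | cons p t ih =>
    rw [List.foldl_cons, ih]
    by_cases hc : p.2 = c
    · simp [hc]
    · simp [hc, PySem.Dict.getD_modify, Ne.symm hc]

theorem pv_nonneg_fst_mem_enumerate {α : Type} (xs : List α) (p : Int × α)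
    (h : p ∈ PySem.List.enumerate xs 0) : 0 ≤ p.1 := by
  rw [PySem.List.mem_enumerate_iff] at h
  obtain ⟨k, hk, rfl⟩ := h
  simp

theorem pv_nodup_fst_enumerate {α : Type} (xs : List α) (f : Int × α → Bool) :
    (((PySem.List.enumerate xs 0).filter f).map (·.1)).Nodup := by
  have h1 : ((PySem.List.enumerate xs 0).filter f).Pairwise (fun p q => p.1 < q.1) :=
    (PySem.List.pairwise_lt_enumerate xs 0).filter f
  rw [List.nodup_iff_pairwise_ne, List.pairwise_map]
  exact h1.imp (fun h => ne_of_lt h)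

-- the rels dict-comprehension, as an items list
theorem pvRels (image_ids : List Int) (oid : Int) :
    ((((PySem.List.enumerate image_ids 0).foldl
        (fun d p => d.modify p.2 [] (fun l => l ++ [p.1])) PySem.Dict.empty).getD oid []).foldl
      (fun r idx => r.insert ("img" ++ PySem.Int.toStr idx) (1 : Int)) PySem.Dict.empty).items
    = ((PySem.List.enumerate image_ids 0).filter (fun e => e.2 == oid)).map
        (fun e => ("img" ++ PySem.Int.toStr e.1, (1 : Int))) := by
  rw [pvGroup]
  simp only [PySem.Dict.getD_empty, List.nil_append]
  rw [PySem.Dict.items_foldl_insert_fresh _ _ _ _ (by simp)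
    (by
      apply List.Nodup.map_on
      · intro x hx y hy hxy
        apply pvKey_inj "img" x y _ _ hxy
        · obtain ⟨e, he, rfl⟩ := List.mem_map.mp hx
          exact pv_nonneg_fst_mem_enumerate _ _ (List.mem_of_mem_filter he)
        · obtain ⟨e, he, rfl⟩ := List.mem_map.mp hy
          exact pv_nonneg_fst_mem_enumerate _ _ (List.mem_of_mem_filter he)
      · exact pv_nodup_fst_enumerate image_ids _)]
  simp only [pv_items_empty_int, List.nil_append, List.map_map]
  rfl

theorem pv_nodup_qkeys (caption_ids : List Int) :
    ((PySem.List.enumerate caption_ids 0).map (fun p => "q" ++ PySem.Int.toStr p.1)).Nodup := by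
  apply List.Nodup.map_on
  · intro x hx y hy hxy
    have hx0 := pv_nonneg_fst_mem_enumerate _ _ hx
    have hy0 := pv_nonneg_fst_mem_enumerate _ _ hy
    have h1 := pvKey_inj "q" x.1 y.1 hx0 hy0 hxy
    rw [PySem.List.mem_enumerate_iff] at hx hy
    obtain ⟨k, hk, hkx⟩ := hx
    obtain ⟨k', hk', hky⟩ := hy
    subst hkx; subst hky
    simp only [zero_add] at h1 ⊢
    have hkk : k = k' := by exact_mod_cast h1
    subst hkk
    rfl
  · rw [List.nodup_iff_pairwise_ne]
    exact (PySem.List.pairwise_lt_enumerate caption_ids 0).imp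
      (fun h heq => absurd (congrArg Prod.fst heq) (ne_of_lt h))

-- ===== VERDICT (by name: the statement is the Claim_ definition above) =====
set_option maxHeartbeats 1000000 in
theorem build_qrels_spec : Claim_equal_build_qrels := by
  intro caption_ids image_ids _
  show build_qrels caption_ids image_ids = build_qrels_alt caption_ids image_ids
  simp only [build_qrels, build_qrels_alt]
  rw [PySem.Dict.items_foldl_insert_fresh (PySem.List.enumerate caption_ids 0)
    (fun p => "q" ++ PySem.Int.toStr p.1)
    (fun p => (((PySem.List.enumerate image_ids 0).foldl
        (fun d p => d.modify p.2 [] (fun l => l ++ [p.1])) PySem.Dict.empty).getD p.2 []).foldl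
      (fun r idx => r.insert ("img" ++ PySem.Int.toStr idx) (1 : Int)) PySem.Dict.empty |>.items)
    PySem.Dict.empty (by simp) (pv_nodup_qkeys caption_ids)]
  simp only [pv_items_empty_q, List.nil_append]
  apply List.map_congr_left
  intro p _
  rw [pvRels]
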